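-- pv_equiv track=rewrite | github.com/ayoubzulfiqar/Leetcode-Medium | FindMaximalUncoveredRanges/find_maximal_uncovered_ranges.py | find_maximal_uncovered_ranges
-- ===== SOURCE A (Python) =====
-- def find_maximal_uncovered_ranges(total_start, total_end, covered_ranges):
--     """
--     Finds the maximal uncovered ranges within a given total range [total_start, total_end],
--     considering a list of covered ranges. All ranges are inclusive.
--
--     Args:
--         total_start (int): The starting point of the total range.
--         total_end (int): The ending point of the total range.
--         covered_ranges (list of list of int): A list of [start, end] pairs representing
--                                               the covered intervals.
--
--     Returns:
--         list of list of int: A list of [start, end] pairs representing the maximal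
--                               uncovered intervals within [total_start, total_end].
--                               Returns an empty list if the entire range is covered.
--     """
--
--     # If there are no covered ranges, the entire total range is uncovered.
--     if not covered_ranges:
--         if total_start <= total_end:
--             return [[total_start, total_end]]
--         else:
--             return [] # Invalid total range
--
--     # 1. Sort the covered ranges by their start points.
--     # This is crucial for correctly merging and finding gaps.
--     covered_ranges.sort()
--
--     # 2. Merge overlapping or adjacent covered ranges into a set of disjoint, maximal ranges.
--     merged_ranges = []
--     for current_range in covered_ranges:
--         # If merged_ranges is empty, or the current range does not overlap/is not adjacent
--         # to the last merged range, add it as a new merged range.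
--         # Adjacency check: current_range[0] > merged_ranges[-1][1] + 1
--         if not merged_ranges or current_range[0] > merged_ranges[-1][1] + 1:
--             merged_ranges.append(list(current_range)) # Use list() to avoid modifying original input if it's tuples
--         else:
--             # Overlap or adjacency: extend the end of the last merged range.
--             merged_ranges[-1][1] = max(merged_ranges[-1][1], current_range[1])
--
--     # 3. Find the uncovered gaps within the total range.
--     uncovered_ranges = []
--     current_uncovered_start = total_start
--
--     for merged_range in merged_ranges:
--         # Calculate the potential gap before the current merged range.
--         # The gap starts from where the last uncovered segment ended (or total_start).
--         # The gap ends just before the current merged range starts.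
--         gap_start = current_uncovered_start
--         gap_end = merged_range[0] - 1
--
--         # If a valid gap exists (start <= end) and it's within the total_end boundary
--         if gap_start <= gap_end:
--             # Ensure the gap's end does not exceed total_end
--             if gap_start <= total_end: # Check if the gap actually starts within or before total_end
--                 uncovered_ranges.append([gap_start, min(gap_end, total_end)])
--
--         # Update the current_uncovered_start to the point immediately after the current merged range ends.
--         # We take max with current_uncovered_start to handle cases where a merged range starts
--         # before total_start (e.g., total_start=5, merged_range=[0,7]). In such cases,
--         # current_uncovered_start should not be moved back.
--         current_uncovered_start = max(current_uncovered_start, merged_range[1] + 1)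
--
--         # Optimization: If the current_uncovered_start has already passed total_end,
--         # no more uncovered ranges can exist within the total range.
--         if current_uncovered_start > total_end:
--             break
--
--     # 4. After iterating through all merged ranges, check for any remaining uncovered range
--     # at the end of the total range (i.e., after the last merged range).
--     if current_uncovered_start <= total_end:
--         uncovered_ranges.append([current_uncovered_start, total_end])
--
--     return uncovered_ranges
-- ===== SOURCE B (Python) =====
-- def find_maximal_uncovered_ranges(total_start, total_end, covered_ranges):
--     """Single-sweep re-implementation: sort in place, then one pass emitting gaps
--     directly, with no intermediate merged list. Same in-place sort side effect as A."""
--     covered_ranges.sort()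
--     uncovered = []
--     cur = total_start
--     for r in covered_ranges:
--         if cur > total_end:
--             break
--         if r[0] > cur:
--             uncovered.append([cur, min(r[0] - 1, total_end)])
--         cur = max(cur, r[1] + 1)
--     if cur <= total_end:
--         uncovered.append([cur, total_end])
--     return uncovered
-- ===== Notes on version B (the rewrite author's own statement) =====
-- stated objective: simpler
-- what changed: B fuses A's two passes (merge overlapping ranges into an intermediate merged_ranges list, then scan it for gaps) into one single sweep over the sorted list that emits gaps directly, with no intermediate merged list.
-- outside the precondition, e.g. on find_maximal_uncovered_ranges(0, 5, [[0, 10], [12]]): A returns [], B returns []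
import Mathlib
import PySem

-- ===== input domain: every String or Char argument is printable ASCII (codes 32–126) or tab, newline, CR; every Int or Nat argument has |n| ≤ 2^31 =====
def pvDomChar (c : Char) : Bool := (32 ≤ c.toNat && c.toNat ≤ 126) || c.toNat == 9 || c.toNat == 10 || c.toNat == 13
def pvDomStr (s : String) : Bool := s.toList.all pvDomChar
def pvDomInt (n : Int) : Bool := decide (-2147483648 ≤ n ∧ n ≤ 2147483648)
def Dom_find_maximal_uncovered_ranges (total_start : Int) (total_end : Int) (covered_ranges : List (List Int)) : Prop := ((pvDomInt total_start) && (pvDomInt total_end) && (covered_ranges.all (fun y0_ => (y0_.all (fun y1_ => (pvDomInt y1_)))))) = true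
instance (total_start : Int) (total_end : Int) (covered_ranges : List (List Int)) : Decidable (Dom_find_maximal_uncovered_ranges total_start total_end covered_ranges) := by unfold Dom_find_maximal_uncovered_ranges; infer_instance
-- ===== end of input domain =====

-- B fuses A's merge pass and gap pass into ONE sweep over the sorted list (no intermediate
-- merged list); equivalence is about the RETURN value — both A and B sort covered_ranges in
-- place, so the mutation side effect is identical.

-- ===== PORT A =====
-- r[0] / r[1] ; none = IndexError, excluded by Pre_ (inner lists of length ≥ 2)
def pvGet0 (l : List Int) : Int := (PySem.List.pyGet? l 0).getD 0
def pvGet1 (l : List Int) : Int := (PySem.List.pyGet? l 1).getD 0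
-- merged_ranges[-1][1] = v  (List.set is a no-op out of range; in range under Pre_)
def pvSet1 (l : List Int) (v : Int) : List Int := l.set 1 v

-- one iteration of A's merge loop: append, or extend the end of the last merged range
def pvMergeStep (acc : List (List Int)) (cur : List Int) : List (List Int) :=
  match acc.getLast? with
  | none => acc ++ [cur]
  | some last =>
      if pvGet0 cur > pvGet1 last + 1 then acc ++ [cur]
      else acc.dropLast ++ [pvSet1 last (max (pvGet1 last) (pvGet1 cur))]

-- A's gap loop (with the break) followed by step 4's final check (the [] case; after a
-- break cur' > total_end so the final check is false and we return unc' directly)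
def pvGapLoop (total_end : Int) : List (List Int) → List (List Int) → Int → List (List Int)
  | [], unc, cur => if cur ≤ total_end then unc ++ [[cur, total_end]] else unc
  | m :: rest, unc, cur =>
      let gap_start := cur
      let gap_end := pvGet0 m - 1
      let unc' := if gap_start ≤ gap_end ∧ gap_start ≤ total_end
                  then unc ++ [[gap_start, min gap_end total_end]] else unc
      let cur' := max cur (pvGet1 m + 1)
      if cur' > total_end then unc' else pvGapLoop total_end rest unc' cur'

def find_maximal_uncovered_ranges (total_start : Int) (total_end : Int) (covered_ranges : List (List Int)) : List (List Int) :=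
  if covered_ranges = [] then
    (if total_start ≤ total_end then [[total_start, total_end]] else [])
  else
    let sortedCov := PySem.List.sorted covered_ranges (fun x => x) false
    let merged := sortedCov.foldl pvMergeStep []
    pvGapLoop total_end merged [] total_start

-- ===== PORT B =====
-- B's single sweep: emit the gap before each range, advance cur past its end
def pvSweep (total_end : Int) : List (List Int) → List (List Int) → Int → List (List Int)
  | [], unc, cur => if cur ≤ total_end then unc ++ [[cur, total_end]] else unc
  | r :: rest, unc, cur =>
      if cur > total_end then unc
      else pvSweep total_end rest
             (if pvGet0 r > cur then unc ++ [[cur, min (pvGet0 r - 1) total_end]] else unc)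
             (max cur (pvGet1 r + 1))

def find_maximal_uncovered_ranges_alt (total_start : Int) (total_end : Int) (covered_ranges : List (List Int)) : List (List Int) :=
  pvSweep total_end (PySem.List.sorted covered_ranges (fun x => x) false) [] total_start

-- ===== PRECONDITION & SPEC =====
-- Pre_ excludes covered lists containing an inner list of fewer than 2 elements: Python A
-- raises IndexError on (almost all of) those; on the rare ones where the break skips the
-- short list A and B both return early with the same value.
def Pre_find_maximal_uncovered_ranges (total_start : Int) (total_end : Int) (covered_ranges : List (List Int)) : Prop :=
  ∀ r ∈ covered_ranges, 2 ≤ r.length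
instance (total_start : Int) (total_end : Int) (covered_ranges : List (List Int)) : Decidable (Pre_find_maximal_uncovered_ranges total_start total_end covered_ranges) := by unfold Pre_find_maximal_uncovered_ranges; infer_instance

def pvWitness_find_maximal_uncovered_ranges : Int × Int × List (List Int) := (0, 10, [[2, 3], [7, 8]])

def Spec_find_maximal_uncovered_ranges (total_start : Int) (total_end : Int) (covered_ranges : List (List Int)) (out : List (List Int)) : Prop := out = find_maximal_uncovered_ranges_alt total_start total_end covered_ranges
instance (total_start : Int) (total_end : Int) (covered_ranges : List (List Int)) (out : List (List Int)) : Decidable (Spec_find_maximal_uncovered_ranges total_start total_end covered_ranges out) := by unfold Spec_find_maximal_uncovered_ranges; infer_instance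

-- ===== CLAIM (what is proved, stated in full; the proofs are below) =====
def Claim_equal_find_maximal_uncovered_ranges : Prop := ∀ (total_start : Int) (total_end : Int) (covered_ranges : List (List Int)), Dom_find_maximal_uncovered_ranges total_start total_end covered_ranges → Pre_find_maximal_uncovered_ranges total_start total_end covered_ranges → Spec_find_maximal_uncovered_ranges total_start total_end covered_ranges (find_maximal_uncovered_ranges total_start total_end covered_ranges)

-- ===== LEMMAS AND PROOFS =====

-- the open current merged group: A's foldl, restated as structural recursion on the tail
def pvMergeRun (m : List Int) : List (List Int) → List (List Int)
  | [] => [m]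
  | r :: rest =>
      if pvGet0 r > pvGet1 m + 1 then m :: pvMergeRun r rest
      else pvMergeRun (pvSet1 m (max (pvGet1 m) (pvGet1 r))) rest

theorem pvGet0_cons (a : Int) (l : List Int) : pvGet0 (a :: l) = a := by
  simp [pvGet0, PySem.List.pyGet?, PySem.List.pyIdx?]

theorem pvGet1_cons (a b : Int) (l : List Int) : pvGet1 (a :: b :: l) = b := by
  simp [pvGet1, PySem.List.pyGet?, PySem.List.pyIdx?]

theorem pvSet1_cons (a b v : Int) (l : List Int) : pvSet1 (a :: b :: l) v = a :: v :: l := by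
  simp [pvSet1]

theorem pvFoldl_merge (L : List (List Int)) (acc : List (List Int)) (m : List Int) :
    L.foldl pvMergeStep (acc ++ [m]) = acc ++ pvMergeRun m L := by
  induction L generalizing acc m with
  | nil => simp [pvMergeRun]
  | cons r rest ih =>
      simp only [List.foldl_cons, pvMergeRun]
      have hlast : (acc ++ [m]).getLast? = some m := by simp
      by_cases h : pvGet0 r > pvGet1 m + 1
      · rw [if_pos h]
        have : pvMergeStep (acc ++ [m]) r = (acc ++ [m]) ++ [r] := by
          simp [pvMergeStep, hlast, h]
        rw [this, ih (acc ++ [m]) r]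
        simp
      · rw [if_neg h]
        have : pvMergeStep (acc ++ [m]) r = acc ++ [pvSet1 m (max (pvGet1 m) (pvGet1 r))] := by
          simp [pvMergeStep, hlast, h]
        rw [this, ih acc _]

theorem pvSweep_of_gt (te : Int) (L : List (List Int)) (unc : List (List Int)) (cur : Int)
    (h : cur > te) : pvSweep te L unc cur = unc := by
  cases L with
  | nil => simp only [pvSweep, if_neg (by omega : ¬ cur ≤ te)]
  | cons r rest => simp [pvSweep, h]

theorem pvMain (te : Int) (L : List (List Int)) (m : List Int)
    (hm : 2 ≤ m.length) (hL : ∀ r ∈ L, 2 ≤ r.length) :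
    ∀ (unc : List (List Int)) (cur : Int),
      pvGapLoop te (pvMergeRun m L) unc cur = pvSweep te (m :: L) unc cur := by
  induction L generalizing m with
  | nil =>
      intro unc cur
      obtain ⟨a, b, t, rfl⟩ : ∃ a b t, m = a :: b :: t := by
        match m, hm with | a :: b :: t, _ => exact ⟨a, b, t, rfl⟩
      simp only [pvMergeRun, pvGapLoop, pvSweep, pvGet0_cons, pvGet1_cons]
      split_ifs <;> first | rfl | omega
  | cons r rest ih =>
      intro unc cur
      obtain ⟨a, b, t, rfl⟩ : ∃ a b t, m = a :: b :: t := by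
        match m, hm with | a :: b :: t, _ => exact ⟨a, b, t, rfl⟩
      have hr : 2 ≤ r.length := hL r (List.mem_cons_self ..)
      obtain ⟨c, d, u, rfl⟩ : ∃ c d u, r = c :: d :: u := by
        match r, hr with | c :: d :: u, _ => exact ⟨c, d, u, rfl⟩
      have hrest : ∀ x ∈ rest, 2 ≤ x.length := fun x hx => hL x (List.mem_cons_of_mem _ hx)
      by_cases hcond : pvGet0 (c :: d :: u) > pvGet1 (a :: b :: t) + 1
      · -- new merged group: the gap before [a,b,…] is emitted now in both programs
        rw [pvMergeRun, if_pos hcond]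
        rw [show pvSweep te ((a :: b :: t) :: (c :: d :: u) :: rest) unc cur =
            (if cur > te then unc
             else pvSweep te ((c :: d :: u) :: rest)
               (if pvGet0 (a :: b :: t) > cur then
                  unc ++ [[cur, min (pvGet0 (a :: b :: t) - 1) te]] else unc)
               (max cur (pvGet1 (a :: b :: t) + 1))) from rfl]
        rw [show pvGapLoop te ((a :: b :: t) :: pvMergeRun (c :: d :: u) rest) unc cur =
            (if max cur (pvGet1 (a :: b :: t) + 1) > te then
               (if cur ≤ pvGet0 (a :: b :: t) - 1 ∧ cur ≤ te then
                  unc ++ [[cur, min (pvGet0 (a :: b :: t) - 1) te]] else unc)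
             else pvGapLoop te (pvMergeRun (c :: d :: u) rest)
               (if cur ≤ pvGet0 (a :: b :: t) - 1 ∧ cur ≤ te then
                  unc ++ [[cur, min (pvGet0 (a :: b :: t) - 1) te]] else unc)
               (max cur (pvGet1 (a :: b :: t) + 1))) from rfl]
        simp only [pvGet0_cons, pvGet1_cons] at *
        by_cases hc : cur > te
        · rw [if_pos hc, if_pos (show max cur (b + 1) > te by omega),
              if_neg (show ¬ (cur ≤ a - 1 ∧ cur ≤ te) by omega)]
        · rw [if_neg hc]
          have hgap : (cur ≤ a - 1 ∧ cur ≤ te) = (a > cur) := by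
            apply propext; constructor <;> intro <;> omega
          simp only [hgap]
          by_cases hb : max cur (b + 1) > te
          · rw [if_pos hb, pvSweep_of_gt te _ _ _ hb]
          · rw [if_neg hb, ih _ hr hrest]
      · -- overlap/adjacency: A extends the open group's end; B's sweep skips the range
        rw [pvMergeRun, if_neg hcond]
        simp only [pvGet0_cons, pvGet1_cons] at hcond ⊢
        rw [pvSet1_cons,
            ih _ (by simp) hrest]
        rw [show pvSweep te ((a :: max b d :: t) :: rest) unc cur =
            (if cur > te then unc
             else pvSweep te rest
               (if a > cur then unc ++ [[cur, min (a - 1) te]] else unc)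
               (max cur (max b d + 1))) from by
          simp only [pvSweep, pvGet0_cons, pvGet1_cons]]
        rw [show pvSweep te ((a :: b :: t) :: (c :: d :: u) :: rest) unc cur =
            (if cur > te then unc
             else pvSweep te ((c :: d :: u) :: rest)
               (if a > cur then unc ++ [[cur, min (a - 1) te]] else unc)
               (max cur (b + 1))) from by
          simp only [pvSweep, pvGet0_cons, pvGet1_cons]]
        by_cases hc : cur > te
        · rw [if_pos hc, if_pos hc]
        · rw [if_neg hc, if_neg hc]
          rw [show pvSweep te ((c :: d :: u) :: rest)
                (if a > cur then unc ++ [[cur, min (a - 1) te]] else unc)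
                (max cur (b + 1)) =
              (if max cur (b + 1) > te then
                 (if a > cur then unc ++ [[cur, min (a - 1) te]] else unc)
               else pvSweep te rest
                 (if c > max cur (b + 1) then
                    (if a > cur then unc ++ [[cur, min (a - 1) te]] else unc) ++
                      [[max cur (b + 1), min (c - 1) te]]
                  else (if a > cur then unc ++ [[cur, min (a - 1) te]] else unc))
                 (max (max cur (b + 1)) (d + 1))) from by
            simp only [pvSweep, pvGet0_cons, pvGet1_cons]]
          rw [if_neg (by omega : ¬ c > max cur (b + 1)),
              show max (max cur (b + 1)) (d + 1) = max cur (max b d + 1) from by omega]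
          by_cases hb : max cur (b + 1) > te
          · rw [if_pos hb, pvSweep_of_gt te _ _ _ (by omega)]
          · rw [if_neg hb]

theorem find_maximal_uncovered_ranges_spec : Claim_equal_find_maximal_uncovered_ranges := by
  intro ts te cov _ hpre
  unfold Spec_find_maximal_uncovered_ranges
  unfold find_maximal_uncovered_ranges find_maximal_uncovered_ranges_alt
  by_cases hnil : cov = []
  · subst hnil
    simp [PySem.List.sorted, pvSweep]
  · rw [if_neg hnil]
    have hs : PySem.List.sorted cov (fun x => x) false ≠ [] := by
      simpa [PySem.List.sorted_eq_nil_iff] using hnil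
    obtain ⟨m, L, hmL⟩ := List.exists_cons_of_ne_nil hs
    have hmem : ∀ r ∈ PySem.List.sorted cov (fun x => x) false, 2 ≤ r.length := by
      intro r hr
      exact hpre r ((PySem.List.mem_sorted _ _ _ _).mp hr)
    rw [hmL]
    show pvGapLoop te ((m :: L).foldl pvMergeStep []) [] ts = pvSweep te (m :: L) [] ts
    have hfold : (m :: L).foldl pvMergeStep [] = pvMergeRun m L := by
      have h0 : pvMergeStep [] m = [] ++ [m] := by simp [pvMergeStep]
      simp only [List.foldl_cons, h0]
      exact pvFoldl_merge L [] m
    rw [hfold]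
    exact (pvMain te L m (hmem m (hmL ▸ List.mem_cons_self ..))
      (fun r hr => hmem r (hmL ▸ List.mem_cons_of_mem _ hr)) [] ts)
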